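-- pv_equiv track=rewrite | github.com/Larry7939/Algorithm | 구현/도미노문제.py | solution
-- ===== SOURCE A (Python) =====
-- from itertools import combinations
--
-- def solution(position, height, m):
--     result = []
--
--     n = len(position)
--     a = combinations(position,m) #제거할 블록 m개 선정
--     for i in a:
--         destroyed_nums = 0
--         is_destroyed = [False]*(n+1)
--         temp = list(set(position)-set(i))
--         temp.sort()
--         needed_position = temp # 블록 m개를 뽑아서 제거
--         result.append(get_destroyed(m,destroyed_nums,is_destroyed,needed_position,height)) # m개가 제거된 블록들로 불안정도의 최댓값을 구한다.
--     answer = min(result)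
--     return answer
--
-- def get_destroyed(m,destroyed_nums,is_destroyed,positions,height):
--     n = len(positions)
--     max_destroyed = []
--     for i in range(n): # 최초 무너짐
--         for j in range(i+1,n):
--             if positions[i] < positions[j] and positions[j] <= positions[i]+height[i]:
--                 is_destroyed[j] = True
--                 destroyed_nums += 1
--
--         for k in is_destroyed: # 연쇄적으로 무너짐
--             if k == True and m == 0:
--                 destroyed_nums += 1
--         max_destroyed.append(destroyed_nums)
--         destroyed_nums = 0
--         is_destroyed = [False]*(n+1)
--     return max(max_destroyed)
-- ===== SOURCE B (Python) =====
-- from itertools import combinations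
--
-- def solution(position, height, m):
--     distinct = sorted(set(position))
--     seen = set()
--     best = None
--     for removed in combinations(position, m):
--         key = tuple(sorted(set(removed)))
--         if key in seen:
--             continue
--         seen.add(key)
--         gone = set(key)
--         temp = [p for p in distinct if p not in gone]
--         worst = 0
--         for k in range(len(temp) - 1):
--             limit = temp[k] + height[k]
--             lo, hi = k + 1, len(temp)
--             while lo < hi:
--                 mid = (lo + hi) // 2
--                 if temp[mid] <= limit:
--                     lo = mid + 1
--                 else:
--                     hi = mid
--             if lo - (k + 1) > worst:
--                 worst = lo - (k + 1)
--         if best is None or worst < best: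
--             best = worst
--     return best
-- ===== Notes on version B (the rewrite author's own statement) =====
-- stated objective: alternative
-- what changed: B sorts the distinct positions once and filters per combination instead of re-sorting, skips combinations whose removed-value set was already seen, and counts each slot's reachable successors by a binary search on the sorted list instead of A's boolean destroyed-array simulation with a rescan chain loop; Pre_ excludes exactly the inputs where A raises (m<0 or m>len(position): ValueError from combinations/min; m >= #distinct positions: max of empty list; height more than one shorter than the largest filtered list: IndexError).
-- intended difference: When m == 0 and some remaining domino can knock over its immediate distinct successor, A returns twice the largest destruction count (its leftover chain loop re-counts every destroyed flag exactly when m == 0), while B returns the count itself, consistent with A's own values for every m > 0; B's undoubled count is the intended value. — e.g. on solution([1, 2], [5], 0): A returns 2, B returns 1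
import Mathlib
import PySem

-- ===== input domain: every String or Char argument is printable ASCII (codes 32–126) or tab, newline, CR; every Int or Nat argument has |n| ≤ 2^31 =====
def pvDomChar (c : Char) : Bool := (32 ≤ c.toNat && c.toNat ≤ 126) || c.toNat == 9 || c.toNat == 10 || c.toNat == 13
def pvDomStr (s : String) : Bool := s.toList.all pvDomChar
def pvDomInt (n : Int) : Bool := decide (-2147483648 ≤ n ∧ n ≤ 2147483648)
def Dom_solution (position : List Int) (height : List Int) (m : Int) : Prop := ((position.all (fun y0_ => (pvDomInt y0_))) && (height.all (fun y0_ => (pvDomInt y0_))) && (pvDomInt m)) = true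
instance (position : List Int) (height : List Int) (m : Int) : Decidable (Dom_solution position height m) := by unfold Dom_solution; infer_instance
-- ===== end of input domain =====

-- B dedups the combinations by their removed-value set (skipping repeats), filters a once-sorted
-- distinct list instead of re-sorting per combination, and finds each reach boundary by binary
-- search instead of A's boolean destroyed-array simulation; return value only.

-- ===== PORT A =====
-- temp = sorted(set(position) - set(i))
def tempOf (position removed : List Int) : List Int :=
  PySem.List.sorted (PySem.Set.diff (PySem.Set.ofList position) (PySem.Set.ofList removed)) (fun x => x) false

def getDestroyed (m : Int) (destroyedNums0 : Int) (isDestroyed0 : List Bool)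
    (positions : List Int) (height : List Int) : Int :=
  let n := positions.length
  let final := (List.range n).foldl
    (fun (st : Int × List Bool × List Int) i =>
      let st1 := (List.range' (i+1) (n - (i+1))).foldl
        (fun (p : Int × List Bool) j =>
          if positions.getD i 0 < positions.getD j 0 ∧
             positions.getD j 0 ≤ positions.getD i 0 + height.getD i 0 then
            (p.1 + 1, p.2.set j true)
          else p) (st.1, st.2.1)
      let dn2 := st1.2.foldl (fun d k => if k = true ∧ m = 0 then d + 1 else d) st1.1
      (0, List.replicate (n+1) false, st.2.2 ++ [dn2]))
    (destroyedNums0, isDestroyed0, ([] : List Int))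
  match PySem.List.max? final.2.2 (fun x => x) with
  | some v => v
  | none => 0

def solution (position : List Int) (height : List Int) (m : Int) : Int :=
  let n := position.length
  let result := (PySem.List.combinations position m.toNat).foldl
    (fun acc i =>
      acc ++ [getDestroyed m 0 (List.replicate (n+1) false) (tempOf position i) height]) []
  match PySem.List.min? result (fun x => x) with
  | some v => v
  | none => 0

-- ===== PORT B =====
-- the while-loop binary search of Source B: first index in [lo, hi) whose entry exceeds limit
-- (fuel = hi - lo only makes the loop structurally recursive; it is never exhausted)
def bsearchGo (temp : List Int) (limit : Int) : Nat → Nat → Nat → Nat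
  | 0, lo, _ => lo
  | fuel+1, lo, hi =>
    if lo < hi then
      if temp.getD ((lo + hi) / 2) 0 ≤ limit then bsearchGo temp limit fuel ((lo + hi) / 2 + 1) hi
      else bsearchGo temp limit fuel lo ((lo + hi) / 2)
    else lo

def bsearch (temp : List Int) (limit : Int) (lo hi : Nat) : Nat :=
  bsearchGo temp limit (hi - lo) lo hi

-- the inner 'for k in range(len(temp) - 1)' loop of Source B
def worstB (temp height : List Int) : Int :=
  (List.range (temp.length - 1)).foldl
    (fun w k =>
      let lo := bsearch temp (temp.getD k 0 + height.getD k 0) (k + 1) temp.length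
      if (lo : Int) - (k + 1) > w then (lo : Int) - (k + 1) else w) 0

def solution_alt (position : List Int) (height : List Int) (m : Int) : Int :=
  let distinct := PySem.List.sorted (PySem.Set.ofList position) (fun x => x) false
  (((PySem.List.combinations position m.toNat).foldl
      (fun (st : List (List Int) × Option Int) removed =>
        let key := PySem.List.sorted (PySem.Set.ofList removed) (fun x => x) false
        if key ∈ st.1 then st
        else
          let temp := distinct.filter (fun p => !(PySem.Set.contains (PySem.Set.ofList key) p))
          let worst := worstB temp height
          (st.1 ++ [key],
            some (match st.2 with
              | none => worst
              | some b => if worst < b then worst else b)))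
      ([], none)).2).getD 0

-- ===== PRECONDITION & SPEC =====
-- Pre_ excludes exactly the inputs where the Python A raises: m < 0 or m > len(position)
-- (ValueError from combinations / min of empty list), m ≥ number of distinct positions (some
-- combination empties temp, max of empty list), or height shorter by two or more than the
-- largest filtered list (IndexError); t below is the fewest distinct values m removed blocks
-- can cover, so d - t is the largest length temp takes over the combinations.
def Pre_solution (position : List Int) (height : List Int) (m : Int) : Prop :=
  let d := (PySem.Set.ofList position).length
  let counts := PySem.List.sorted ((PySem.Set.ofList position).map (fun v => (position.count v : Int))) (fun x => x) true
  let t := (((List.range (d+1)).find? (fun t => decide (m ≤ (counts.take t).sum))).getD d)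
  0 ≤ m ∧ m ≤ (position.length : Int) ∧ m.toNat < d ∧ d - t ≤ height.length + 1
instance (position : List Int) (height : List Int) (m : Int) : Decidable (Pre_solution position height m) := by unfold Pre_solution; infer_instance

def pvWitness_solution : List Int × List Int × Int := ([1, 2, 3], [1, 1], 1)

-- When m == 0 (the only case whose chain loop fires) A returns TWICE the largest destruction
-- count — each destroyed flag is re-counted by the leftover chain loop — while B returns the
-- count itself, consistent with what A returns for every m > 0; B's value is the intended one.
-- (The condition says: some distinct position p can knock over its immediate distinct successor
-- q, where p's height is looked up at p's rank among the distinct positions.)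
def D_solution (position : List Int) (height : List Int) (m : Int) : Prop :=
  m = 0 ∧
  ∃ p ∈ position, ∃ q ∈ position, p < q ∧ (∀ r ∈ position, ¬ (p < r ∧ r < q)) ∧
    q ≤ p + height.getD ((position.filter (fun v => v < p)).dedup).length 0
instance (position : List Int) (height : List Int) (m : Int) : Decidable (D_solution position height m) := by unfold D_solution; infer_instance

def Spec_solution (position : List Int) (height : List Int) (m : Int) (out : Int) : Prop := ¬ D_solution position height m → out = solution_alt position height m
instance (position : List Int) (height : List Int) (m : Int) (out : Int) : Decidable (Spec_solution position height m out) := by unfold Spec_solution; infer_instance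

def pvDiffWitness_solution : List Int × List Int × Int := ([1, 2], [5], 0)
def pvDiffWitnessOut_solution : Int × Int := (2, 1)

-- ===== CLAIM (what is proved, stated in full; the proofs are below) =====
def Claim_unchanged_solution : Prop := ∀ (position : List Int) (height : List Int) (m : Int), Dom_solution position height m → Pre_solution position height m → Spec_solution position height m (solution position height m)
def Claim_changed_solution : Prop := Dom_solution (pvDiffWitness_solution.1) (pvDiffWitness_solution.2.1) (pvDiffWitness_solution.2.2) ∧ Pre_solution (pvDiffWitness_solution.1) (pvDiffWitness_solution.2.1) (pvDiffWitness_solution.2.2) ∧ D_solution (pvDiffWitness_solution.1) (pvDiffWitness_solution.2.1) (pvDiffWitness_solution.2.2) ∧ solution (pvDiffWitness_solution.1) (pvDiffWitness_solution.2.1) (pvDiffWitness_solution.2.2) = pvDiffWitnessOut_solution.1 ∧ solution_alt (pvDiffWitness_solution.1) (pvDiffWitness_solution.2.1) (pvDiffWitness_solution.2.2) = pvDiffWitnessOut_solution.2 ∧ pvDiffWitnessOut_solution.1 ≠ pvDiffWitnessOut_solution.2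
def Claim_exact_solution : Prop := ∀ (position : List Int) (height : List Int) (m : Int), Dom_solution position height m → Pre_solution position height m → D_solution position height m → solution position height m ≠ solution_alt position height m

-- ===== LEMMAS AND PROOFS =====

-- ---------- A-side: the boolean-array simulation counts reachable successors ----------

-- the chain loop adds the number of True entries, and only when m == 0
lemma chain_fold (m dn : Int) (l : List Bool) :
    l.foldl (fun d k => if k = true ∧ m = 0 then d + 1 else d) dn
      = dn + (if m = 0 then (l.count true : Int) else 0) := by
  by_cases hm : m = 0
  · subst hm
    simp only [and_true]
    rw [PySem.List.foldl_ite_add_one (p := fun k : Bool => k = true)]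
    simp [List.count_eq_countP]
  · simp only [hm, and_false, if_false]
    rw [PySem.List.foldl_ignore l dn]; ring

lemma getD_false_of_all_false {l : List Bool} (h : ∀ b ∈ l, b = false) (j : Nat) :
    l.getD j false = false := by
  rw [List.getD_eq_getElem?_getD]
  cases hj : l[j]? with
  | none => rfl
  | some b => exact h b (List.mem_of_getElem? hj)

lemma count_set_true : ∀ (l : List Bool) (j : Nat), j < l.length → l.getD j false = false →
    (l.set j true).count true = l.count true + 1 := by
  intro l
  induction l with
  | nil => intro j hj; simp at hj
  | cons b t ih =>
    intro j hj hf
    cases j with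
    | zero =>
      simp only [List.getD_cons_zero] at hf
      subst hf
      simp
    | succ j =>
      simp only [List.getD_cons_succ] at hf
      simp only [List.set_cons_succ, List.count_cons]
      rw [ih j (by simpa using hj) hf]
      omega

-- the first inner loop: destroyed_nums counts the hits, and so does is_destroyed
lemma inner_fold (cond : Nat → Prop) [DecidablePred cond] :
    ∀ (js : List Nat) (dn : Int) (isd : List Bool), js.Nodup →
      (∀ j ∈ js, j < isd.length ∧ isd.getD j false = false) →
      (js.foldl (fun (p : Int × List Bool) j => if cond j then (p.1 + 1, p.2.set j true) else p) (dn, isd)).1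
          = dn + (js.countP (fun j => decide (cond j)) : Int) ∧
      (js.foldl (fun (p : Int × List Bool) j => if cond j then (p.1 + 1, p.2.set j true) else p) (dn, isd)).2.count true
          = isd.count true + js.countP (fun j => decide (cond j)) := by
  intro js
  induction js with
  | nil => intro dn isd _ _; simp
  | cons j js ih =>
    intro dn isd hnd hmem
    have hj := hmem j (List.mem_cons_self ..)
    have hnd' := (List.nodup_cons.mp hnd)
    by_cases hc : cond j
    · simp only [List.foldl_cons, if_pos hc]
      have hmem' : ∀ j' ∈ js, j' < (isd.set j true).length ∧ (isd.set j true).getD j' false = false := by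
        intro j' hj'
        have hne : j ≠ j' := fun h => hnd'.1 (h ▸ hj')
        refine ⟨by simpa using (hmem j' (List.mem_cons_of_mem _ hj')).1, ?_⟩
        rw [List.getD_eq_getElem?_getD, List.getElem?_set_ne hne, ← List.getD_eq_getElem?_getD]
        exact (hmem j' (List.mem_cons_of_mem _ hj')).2
      obtain ⟨h1, h2⟩ := ih (dn + 1) (isd.set j true) hnd'.2 hmem'
      refine ⟨?_, ?_⟩
      · rw [h1, List.countP_cons_of_pos (l := js) (by simpa using hc)]
        push_cast; ring
      · rw [h2, count_set_true isd j hj.1 hj.2, List.countP_cons_of_pos (l := js) (by simpa using hc)]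
        omega
    · simp only [List.foldl_cons, if_neg hc]
      obtain ⟨h1, h2⟩ := ih dn isd hnd'.2 (fun j' hj' => hmem j' (List.mem_cons_of_mem _ hj'))
      rw [List.countP_cons_of_neg (l := js) (by simpa using hc)]
      exact ⟨h1, h2⟩

-- the value A records for index i of one combination
def valA (temp height : List Int) (m : Int) (i : Nat) : Int :=
  ((List.range' (i+1) (temp.length - (i+1))).countP
      (fun j => decide (temp.getD i 0 < temp.getD j 0 ∧ temp.getD j 0 ≤ temp.getD i 0 + height.getD i 0)) : Int)
    + (if m = 0 then ((List.range' (i+1) (temp.length - (i+1))).countP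
      (fun j => decide (temp.getD i 0 < temp.getD j 0 ∧ temp.getD j 0 ≤ temp.getD i 0 + height.getD i 0)) : Int) else 0)

lemma outer_fold (temp height : List Int) (m : Int) :
    ∀ (idxs : List Nat) (isd : List Bool) (acc : List Int),
      (∀ b ∈ isd, b = false) → temp.length ≤ isd.length →
      (idxs.foldl
        (fun (st : Int × List Bool × List Int) i =>
          let st1 := (List.range' (i+1) (temp.length - (i+1))).foldl
            (fun (p : Int × List Bool) j =>
              if temp.getD i 0 < temp.getD j 0 ∧
                 temp.getD j 0 ≤ temp.getD i 0 + height.getD i 0 then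
                (p.1 + 1, p.2.set j true)
              else p) (st.1, st.2.1)
          let dn2 := st1.2.foldl (fun d k => if k = true ∧ m = 0 then d + 1 else d) st1.1
          (0, List.replicate (temp.length+1) false, st.2.2 ++ [dn2]))
        (0, isd, acc)).2.2 = acc ++ idxs.map (valA temp height m) := by
  intro idxs
  induction idxs with
  | nil => intro isd acc _ _; simp
  | cons i idxs ih =>
    intro isd acc hfalse hlen
    simp only [List.foldl_cons]
    have hmem : ∀ j ∈ List.range' (i+1) (temp.length - (i+1)), j < isd.length ∧ isd.getD j false = false := by
      intro j hj
      have := List.mem_range'_1.mp hj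
      exact ⟨by omega, getD_false_of_all_false hfalse j⟩
    have hnd : (List.range' (i+1) (temp.length - (i+1))).Nodup := List.nodup_range'
    obtain ⟨h1, h2⟩ := inner_fold
      (fun j => temp.getD i 0 < temp.getD j 0 ∧ temp.getD j 0 ≤ temp.getD i 0 + height.getD i 0)
      (List.range' (i+1) (temp.length - (i+1))) 0 isd hnd hmem
    have hcnt0 : isd.count true = 0 :=
      List.count_eq_zero.mpr (fun h => by simpa using hfalse _ h)
    rw [ih (List.replicate (temp.length + 1) false) _
      (fun b hb => List.eq_of_mem_replicate hb) (by simp)]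
    rw [chain_fold, h1, h2, hcnt0]
    simp only [List.append_assoc, List.singleton_append, List.map_cons]
    congr 2
    simp only [valA]
    push_cast
    split <;> ring

lemma foldl_max_comm : ∀ (t : List Int) (a b : Int), t.foldl max (max a b) = max a (t.foldl max b) := by
  intro t
  induction t with
  | nil => intro a b; rfl
  | cons c t ih =>
    intro a b
    simp only [List.foldl_cons, max_assoc]
    exact ih a (max b c)

lemma max_match_append_zero (l : List Int) :
    (match PySem.List.max? (l ++ [(0:Int)]) (fun x => x) with | some v => v | none => 0)
      = l.foldl max 0 := by
  cases l with
  | nil => rw [List.nil_append, PySem.List.max?_id_cons]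
  | cons x t =>
    rw [List.cons_append, PySem.List.max?_id_cons]
    show List.foldl max x (t ++ [0]) = List.foldl max 0 (x :: t)
    rw [List.foldl_append]
    show max (List.foldl max x t) 0 = List.foldl max (max 0 x) t
    rw [foldl_max_comm t 0 x, max_comm]

lemma countP_range'_getD (p : Int → Bool) : ∀ (c s : Nat) (l : List Int), s + c = l.length →
    (List.range' s c).countP (fun j => p (l.getD j 0)) = (l.drop s).countP p := by
  intro c
  induction c with
  | zero =>
    intro s l h
    rw [List.drop_of_length_le (by omega)]
    rfl
  | succ c ih =>
    intro s l h
    have hs : s < l.length := by omega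
    rw [List.range'_succ, List.drop_eq_getElem_cons hs]
    rw [List.countP_cons, List.countP_cons, ih (s+1) l (by omega), List.getD_eq_getElem l 0 hs]

-- the per-index count that both programs compute: successors of slot k within reach of height[k]
def cntK (temp height : List Int) (k : Nat) : Int :=
  ((temp.drop (k+1)).countP (fun p => decide (p ≤ temp.getD k 0 + height.getD k 0)) : Int)

-- the per-combination answer both programs agree on (up to A's m==0 factor)
def W (temp height : List Int) : Int :=
  (List.range (temp.length - 1)).foldl (fun w k => max w (cntK temp height k)) 0

lemma valA_eq_cnt (temp height : List Int) (m : Int) (hs : temp.Pairwise (· < ·))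
    (k : Nat) (hk : k + 1 < temp.length) :
    valA temp height m k = (if m = 0 then (2:Int) else 1) * cntK temp height k := by
  unfold cntK
  rw [← countP_range'_getD (fun x => decide (x ≤ temp.getD k 0 + height.getD k 0))
      (temp.length - (k+1)) (k+1) temp (by omega)]
  have hcc : (List.range' (k+1) (temp.length - (k+1))).countP
        (fun j => decide (temp.getD j 0 ≤ temp.getD k 0 + height.getD k 0))
      = (List.range' (k+1) (temp.length - (k+1))).countP
        (fun j => decide (temp.getD k 0 < temp.getD j 0 ∧ temp.getD j 0 ≤ temp.getD k 0 + height.getD k 0)) := by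
    apply List.countP_congr
    intro j hj
    have hjr := List.mem_range'_1.mp hj
    have hjlen : j < temp.length := by omega
    have hlt : temp.getD k 0 < temp.getD j 0 := by
      rw [List.getD_eq_getElem temp 0 (by omega), List.getD_eq_getElem temp 0 hjlen]
      exact List.pairwise_iff_getElem.mp hs k j (by omega) hjlen (by omega)
    simp only [decide_eq_true_eq]
    exact ⟨fun h' => ⟨hlt, h'⟩, fun h' => h'.2⟩
  rw [hcc]
  unfold valA
  split <;> ring

lemma foldl_max_mul (c : Int) (hc : 0 ≤ c) (f : Nat → Int) :
    ∀ (l : List Nat) (a : Int),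
      l.foldl (fun w k => max w (c * f k)) (c * a) = c * l.foldl (fun w k => max w (f k)) a := by
  intro l
  induction l with
  | nil => intro a; rfl
  | cons k t ih =>
    intro a
    simp only [List.foldl_cons]
    rw [← mul_max_of_nonneg _ _ hc]
    exact ih (max a (f k))

lemma getDestroyed_eq (m : Int) (temp height : List Int) (L : Nat)
    (hs : temp.Pairwise (· < ·)) (hL : temp.length ≤ L) :
    getDestroyed m 0 (List.replicate (L+1) false) temp height
      = (if m = 0 then (2:Int) else 1) * W temp height := by
  unfold getDestroyed
  dsimp only
  rw [outer_fold temp height m (List.range temp.length) (List.replicate (L+1) false) []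
      (fun b hb => List.eq_of_mem_replicate hb) (by simp; omega), List.nil_append]
  rcases Nat.eq_zero_or_pos temp.length with hz | hposn
  · rw [hz]
    simp only [List.range_zero, List.map_nil]
    rw [(PySem.List.max?_eq_none_iff _ _).mpr rfl]
    unfold W
    rw [hz]
    simp
  · obtain ⟨N, hpos⟩ : ∃ N, temp.length = N + 1 := ⟨temp.length - 1, by omega⟩
    have hvN : valA temp height m N = 0 := by
      unfold valA
      rw [show temp.length - (N+1) = 0 by omega, List.range'_zero]
      simp
    rw [hpos, List.range_succ, List.map_append, List.map_singleton, hvN,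
      max_match_append_zero, List.foldl_map]
    rw [PySem.List.foldl_congr_mem (List.range N)
        (fun w k => max w (valA temp height m k))
        (fun w k => max w ((if m = 0 then (2:Int) else 1) * cntK temp height k)) 0
        (fun acc k hk => by dsimp only; rw [valA_eq_cnt temp height m hs k (by have := List.mem_range.mp hk; omega)])]
    have hmul := foldl_max_mul (if m = 0 then (2:Int) else 1) (by split <;> norm_num)
      (cntK temp height) (List.range N) 0
    rw [mul_zero] at hmul
    rw [hmul]
    unfold W
    rw [hpos, Nat.add_sub_cancel]

-- ---------- B-side: the binary search finds the same count ----------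

lemma getD_mono_of_sorted {temp : List Int} (hs : temp.Pairwise (· ≤ ·))
    {i j : Nat} (hij : i ≤ j) (hj : j < temp.length) :
    temp.getD i 0 ≤ temp.getD j 0 := by
  rcases Nat.lt_or_ge i j with h | h
  · rw [List.getD_eq_getElem temp 0 (by omega), List.getD_eq_getElem temp 0 hj]
    exact List.pairwise_iff_getElem.mp hs i j (by omega) hj h
  · have : i = j := by omega
    subst this
    exact le_refl _

lemma bsearch_spec (temp : List Int) (limit : Int) (hs : temp.Pairwise (· ≤ ·)) :
    ∀ (fuel lo hi : Nat), hi - lo ≤ fuel → lo ≤ hi → hi ≤ temp.length →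
      lo ≤ bsearchGo temp limit fuel lo hi ∧ bsearchGo temp limit fuel lo hi ≤ hi ∧
      (∀ i, lo ≤ i → i < bsearchGo temp limit fuel lo hi → temp.getD i 0 ≤ limit) ∧
      (∀ i, bsearchGo temp limit fuel lo hi ≤ i → i < hi → limit < temp.getD i 0) := by
  intro fuel
  induction fuel with
  | zero =>
    intro lo hi hf hle hhi
    exact ⟨le_refl _, hle, fun i h1 h2 => by simp [bsearchGo] at h2; omega,
      fun i h1 h2 => by simp only [bsearchGo] at h1; omega⟩
  | succ fuel ih =>
    intro lo hi hf hle hhi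
    by_cases hlt : lo < hi
    · rw [bsearchGo]
      rw [if_pos hlt]
      by_cases hmid : temp.getD ((lo + hi) / 2) 0 ≤ limit
      · rw [if_pos hmid]
        obtain ⟨r1, r2, r3, r4⟩ := ih ((lo + hi) / 2 + 1) hi (by omega) (by omega) hhi
        refine ⟨by omega, r2, ?_, r4⟩
        intro i h1 h2
        rcases Nat.lt_or_ge i ((lo + hi) / 2 + 1) with hi' | hi'
        · exact le_trans (getD_mono_of_sorted hs (by omega) (by omega)) hmid
        · exact r3 i hi' h2
      · rw [if_neg hmid]
        obtain ⟨r1, r2, r3, r4⟩ := ih lo ((lo + hi) / 2) (by omega) (by omega) (by omega)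
        refine ⟨r1, by omega, r3, ?_⟩
        intro i h1 h2
        rcases Nat.lt_or_ge i ((lo + hi) / 2) with hi' | hi'
        · exact r4 i h1 hi'
        · exact lt_of_lt_of_le (lt_of_not_ge hmid) (getD_mono_of_sorted hs hi' (by omega))
    · rw [bsearchGo]
      rw [if_neg hlt]
      exact ⟨le_refl _, by omega, fun i h1 h2 => by omega, fun i h1 h2 => by omega⟩

lemma countP_prefix : ∀ (l : List Int) (p : Int → Bool) (a : Nat), a ≤ l.length →
    (∀ i (h : i < l.length), p l[i] = decide (i < a)) → l.countP p = a := by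
  intro l
  induction l with
  | nil => intro p a ha _; simp at ha ⊢; omega
  | cons x t ih =>
    intro p a ha hp
    cases a with
    | zero =>
      rw [List.countP_eq_zero.mpr]
      intro y hy
      obtain ⟨i, hi, rfl⟩ := List.mem_iff_getElem.mp hy
      rw [hp i hi]
      simp
    | succ a =>
      have hx : p x = true := by
        have := hp 0 (by simp)
        simpa using this
      rw [List.countP_cons_of_pos hx]
      rw [ih (fun y => p y) a (by simpa using ha)
        (fun i h => by simpa using hp (i+1) (by simpa using Nat.succ_lt_succ h))]

lemma bsearch_count (temp : List Int) (hs : temp.Pairwise (· ≤ ·)) (limit : Int)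
    (k : Nat) (hk : k + 1 ≤ temp.length) :
    ((bsearch temp limit (k+1) temp.length : Int)) - (k+1)
      = ((temp.drop (k+1)).countP (fun p => decide (p ≤ limit)) : Int) := by
  unfold bsearch
  obtain ⟨r1, r2, r3, r4⟩ := bsearch_spec temp limit hs (temp.length - (k+1)) (k+1) temp.length
    (le_refl _) hk (le_refl _)
  set r := bsearchGo temp limit (temp.length - (k+1)) (k+1) temp.length with hr
  have hcnt : (temp.drop (k+1)).countP (fun p => decide (p ≤ limit)) = r - (k+1) := by
    apply countP_prefix
    · rw [List.length_drop]; omega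
    · intro i h
      rw [List.length_drop] at h
      rw [List.getElem_drop]
      rcases Nat.lt_or_ge (k+1+i) r with hir | hir
      · rw [← List.getD_eq_getElem temp 0 (by omega), decide_eq_decide]
        exact iff_of_true (r3 (k+1+i) (by omega) hir) (by omega)
      · rw [← List.getD_eq_getElem temp 0 (by omega), decide_eq_decide]
        have := r4 (k+1+i) hir (by omega)
        exact iff_of_false (by omega) (by omega)
  rw [hcnt]
  omega

lemma worstB_eq_W (temp height : List Int) (hs : temp.Pairwise (· < ·)) :
    worstB temp height = W temp height := by
  unfold worstB W
  apply PySem.List.foldl_congr_mem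
  intro w k hk
  have hk' : k < temp.length - 1 := List.mem_range.mp hk
  dsimp only
  rw [show ((bsearch temp (temp.getD k 0 + height.getD k 0) (k+1) temp.length : Nat) : Int) - (k+1)
      = cntK temp height k from
    bsearch_count temp (hs.imp le_of_lt) (temp.getD k 0 + height.getD k 0) k (by omega)]
  rcases lt_or_ge w (cntK temp height k) with h | h
  · rw [if_pos h, max_eq_right (le_of_lt h)]
  · rw [if_neg (by omega), max_eq_left h]

-- ---------- temp built by A and by B is the same list ----------

def distinctOf (position : List Int) : List Int :=
  PySem.List.sorted (PySem.Set.ofList position) (fun x => x) false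

def keyOf (removed : List Int) : List Int :=
  PySem.List.sorted (PySem.Set.ofList removed) (fun x => x) false

def tempB (position removed : List Int) : List Int :=
  (distinctOf position).filter (fun p => !(PySem.Set.contains (PySem.Set.ofList (keyOf removed)) p))

def fB (position height : List Int) (removed : List Int) : Int :=
  worstB (tempB position removed) height

lemma temp_eq (position removed : List Int) :
    tempOf position removed = tempB position removed := by
  have hpair : (tempB position removed).Pairwise (· < ·) :=
    List.Pairwise.sublist List.filter_sublist (PySem.List.sorted_ofList_pairwise_lt position)
  have hcontains : ∀ x : Int,
      (PySem.Set.contains (PySem.Set.ofList (keyOf removed)) x)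
        = (PySem.Set.ofList removed).contains x := by
    intro x
    simp only [PySem.Set.contains]
    by_cases hx : x ∈ PySem.Set.ofList removed
    · have hx' : x ∈ PySem.Set.ofList (keyOf removed) := by
        rw [PySem.Set.mem_ofList]
        unfold keyOf
        rw [PySem.List.mem_sorted, PySem.Set.mem_ofList, ← PySem.Set.mem_ofList removed x]
        exact hx
      rw [List.contains_iff_mem.mpr hx, List.contains_iff_mem.mpr hx']
    · have hx' : ¬ x ∈ PySem.Set.ofList (keyOf removed) := by
        rw [PySem.Set.mem_ofList]
        unfold keyOf
        rw [PySem.List.mem_sorted, PySem.Set.mem_ofList, ← PySem.Set.mem_ofList removed x]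
        exact hx
      rw [Bool.eq_iff_iff]
      simp only [List.contains_iff_mem]
      exact ⟨fun h => absurd h hx', fun h => absurd h hx⟩
  have hperm : (tempB position removed).Perm
      (PySem.Set.diff (PySem.Set.ofList position) (PySem.Set.ofList removed)) := by
    unfold tempB distinctOf
    have h1 := List.Perm.filter (fun p => !(PySem.Set.contains (PySem.Set.ofList (keyOf removed)) p))
      (PySem.List.sorted_perm (PySem.Set.ofList position) (fun x => x) false)
    have h2 : (PySem.Set.ofList position).filter
        (fun p => !(PySem.Set.contains (PySem.Set.ofList (keyOf removed)) p))
        = PySem.Set.diff (PySem.Set.ofList position) (PySem.Set.ofList removed) := by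
      unfold PySem.Set.diff
      apply List.filter_congr
      intro x _
      rw [hcontains x]
    rw [h2] at h1
    exact h1
  exact PySem.List.sorted_eq_of_perm_of_pairwise_lt _ _ _ hperm hpair

lemma tempOf_pairwise (pos rem : List Int) : (tempOf pos rem).Pairwise (· < ·) := by
  rw [temp_eq]
  exact List.Pairwise.sublist List.filter_sublist (PySem.List.sorted_ofList_pairwise_lt pos)

lemma tempOf_length_le (pos rem : List Int) : (tempOf pos rem).length ≤ pos.length := by
  unfold tempOf
  rw [PySem.List.length_sorted]
  simp only [PySem.Set.diff]
  exact le_trans (List.length_filter_le _ _) (PySem.Set.length_ofList_le pos)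

-- ---------- the dedup-by-key fold computes min over all combinations ----------

def gstep (key : List Int → List Int) (f : List Int → Int)
    (st : List (List Int) × Option Int) (a : List Int) : List (List Int) × Option Int :=
  if key a ∈ st.1 then st
  else (st.1 ++ [key a],
    some (match st.2 with
      | none => f a
      | some b => if f a < b then f a else b))

lemma skipfold_some (key : List Int → List Int) (f : List Int → Int)
    (hf : ∀ a b, key a = key b → f a = f b) :
    ∀ (l : List (List Int)) (seen : List (List Int)) (b : Int),
      (∀ a ∈ l, key a ∈ seen → b ≤ f a) →
      (l.foldl (gstep key f) (seen, some b)).2 = some (l.foldl (fun w a => min w (f a)) b) := by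
  intro l
  induction l with
  | nil => intro seen b _; rfl
  | cons a t ih =>
    intro seen b hinv
    by_cases hk : key a ∈ seen
    · have hb : min b (f a) = b := min_eq_left (hinv a (List.mem_cons_self ..) hk)
      simp only [List.foldl_cons, gstep, if_pos hk]
      rw [ih seen b (fun a' ha' hk' => hinv a' (List.mem_cons_of_mem _ ha') hk'), hb]
    · simp only [List.foldl_cons, gstep, if_neg hk]
      have hmin : (if f a < b then f a else b) = min b (f a) := by
        rcases lt_or_ge (f a) b with h | h
        · rw [if_pos h, min_eq_right (le_of_lt h)]
        · rw [if_neg (by omega), min_eq_left h]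
      rw [hmin]
      apply ih
      intro a' ha' hk'
      rcases List.mem_append.mp hk' with h | h
      · exact le_trans (min_le_left _ _) (hinv a' (List.mem_cons_of_mem _ ha') h)
      · have : key a' = key a := List.mem_singleton.mp h
        rw [hf a' a this]
        exact min_le_right _ _

lemma skipfold_run (key : List Int → List Int) (f : List Int → Int)
    (hf : ∀ a b, key a = key b → f a = f b) (c : List Int) (l : List (List Int)) :
    (((c :: l).foldl (gstep key f) ([], none)).2).getD 0
      = l.foldl (fun w a => min w (f a)) (f c) := by
  have h0 : gstep key f ([], none) c = ([key c], some (f c)) := by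
    unfold gstep
    rw [if_neg (List.not_mem_nil)]
    rfl
  rw [List.foldl_cons, h0,
    skipfold_some key f hf l [key c] (f c)
      (fun a ha hk => by rw [hf a c (List.mem_singleton.mp hk)])]
  rfl

lemma alt_eq (position height : List Int) (m : Int) :
    solution_alt position height m
      = (((PySem.List.combinations position m.toNat).foldl
          (gstep keyOf (fB position height)) ([], none)).2).getD 0 := by
  unfold solution_alt
  apply congrArg (fun o => Option.getD o 0)
  apply congrArg Prod.snd
  apply congrArg (fun g => List.foldl g (([] : List (List Int)), (none : Option Int)) (PySem.List.combinations position m.toNat))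
  funext st a
  rfl

lemma A_as_min (position height : List Int) (m : Int) :
    solution position height m
      = match PySem.List.min? ((PySem.List.combinations position m.toNat).map
          (fun r => getDestroyed m 0 (List.replicate (position.length+1) false) (tempOf position r) height))
          (fun x => x) with
        | some v => v
        | none => 0 := by
  unfold solution
  dsimp only
  rw [PySem.List.foldl_append_singleton_eq_map
      (f := fun i => getDestroyed m 0 (List.replicate (position.length+1) false) (tempOf position i) height),
      List.nil_append]

lemma min_assemble (position height : List Int) (m : Int) (c : List Int) (l : List (List Int))
    (hc : PySem.List.combinations position m.toNat = c :: l)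
    (hpc : ∀ r ∈ PySem.List.combinations position m.toNat,
      getDestroyed m 0 (List.replicate (position.length+1) false) (tempOf position r) height
        = fB position height r) :
    solution position height m = solution_alt position height m := by
  have hfB : ∀ a b : List Int, keyOf a = keyOf b → fB position height a = fB position height b := by
    intro a b h
    unfold fB tempB
    rw [h]
  rw [A_as_min, hc, List.map_cons, PySem.List.min?_id_cons,
    alt_eq, hc, skipfold_run keyOf (fB position height) hfB c l, List.foldl_map]
  rw [hpc c (hc ▸ List.mem_cons_self ..)]
  exact PySem.List.foldl_congr_mem l _ _ _
    (fun acc r hr => by rw [hpc r (hc ▸ List.mem_cons_of_mem c hr)])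

lemma combos_ne (position : List Int) (m : Int) (_h0 : 0 ≤ m) (hle : m ≤ (position.length : Int)) :
    PySem.List.combinations position m.toNat ≠ [] := by
  intro h
  have hmem : position.take m.toNat ∈ PySem.List.combinations position m.toNat :=
    (PySem.List.mem_combinations_iff _ _ _).mpr
      ⟨List.take_sublist _ _, by rw [List.length_take]; omega⟩
  rw [h] at hmem
  exact absurd hmem (List.not_mem_nil)

-- ---------- the m == 0 corner ----------

lemma cntK_eq_zero (temp height : List Int) (hs : temp.Pairwise (· ≤ ·)) (k : Nat)
    (hgt : temp.getD k 0 + height.getD k 0 < temp.getD (k+1) 0) :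
    cntK temp height k = 0 := by
  unfold cntK
  rw [show (temp.drop (k+1)).countP (fun p => decide (p ≤ temp.getD k 0 + height.getD k 0)) = 0 from ?_]
  · rfl
  rw [List.countP_eq_zero]
  intro p hp
  obtain ⟨i, hi, rfl⟩ := List.mem_iff_getElem.mp hp
  rw [List.length_drop] at hi
  rw [List.getElem_drop, ← List.getD_eq_getElem temp 0 (by omega)]
  have h1 : temp.getD (k+1) 0 ≤ temp.getD (k+1+i) 0 :=
    getD_mono_of_sorted hs (by omega) (by omega)
  simp only [decide_eq_true_eq]
  omega

lemma foldl_max_zero : ∀ (l : List Nat) (a : Int), 0 ≤ a →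
    l.foldl (fun w (_ : Nat) => max w (0:Int)) a = a := by
  intro l
  induction l with
  | nil => intro a _; rfl
  | cons k t ih =>
    intro a ha
    simp only [List.foldl_cons, max_eq_left ha]
    exact ih a ha

lemma W_eq_zero (temp height : List Int) (hs : temp.Pairwise (· ≤ ·))
    (h : ∀ k, k < temp.length - 1 → ¬ (temp.getD (k+1) 0 ≤ temp.getD k 0 + height.getD k 0)) :
    W temp height = 0 := by
  unfold W
  rw [PySem.List.foldl_congr_mem _ _ (fun w (_ : Nat) => max w (0:Int)) 0
    (fun acc k hk => by
      rw [cntK_eq_zero temp height hs k (by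
        have := h k (List.mem_range.mp hk)
        omega)])]
  exact foldl_max_zero _ 0 (le_refl _)

lemma key_nil : keyOf [] = ([] : List Int) := rfl

lemma tempB_nil (position : List Int) : tempB position [] = distinctOf position := by
  unfold tempB
  rw [List.filter_congr (q := fun _ => true) (fun x _ => by rw [key_nil]; rfl)]
  exact List.filter_true _

lemma distinct_pairwise (position : List Int) : (distinctOf position).Pairwise (· < ·) :=
  PySem.List.sorted_ofList_pairwise_lt position

lemma tempOf_nil (position : List Int) : tempOf position [] = distinctOf position := by
  rw [temp_eq, tempB_nil]


-- ---------- D_ restated over the sorted distinct list ----------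

lemma mem_distinct (position : List Int) (x : Int) : x ∈ distinctOf position ↔ x ∈ position := by
  unfold distinctOf
  rw [PySem.List.mem_sorted, PySem.Set.mem_ofList]

lemma nodup_distinct (position : List Int) : (distinctOf position).Nodup :=
  (distinct_pairwise position).imp (fun h => ne_of_lt h)

lemma idx_lt_of_val_lt (position : List Int) {i j : Nat}
    (hi : i < (distinctOf position).length) (hj : j < (distinctOf position).length)
    (h : (distinctOf position)[i] < (distinctOf position)[j]) : i < j := by
  have hmono := List.pairwise_iff_getElem.mp (distinct_pairwise position)
  by_contra hge
  rcases Nat.eq_or_lt_of_le (Nat.le_of_not_lt hge) with he | hlt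
  · subst he
    exact absurd h (lt_irrefl _)
  · exact absurd (hmono j i hj hi hlt) (by omega)

lemma rank_eq (position : List Int) (i : Nat) (hi : i < (distinctOf position).length) :
    ((position.filter (fun v => decide (v < (distinctOf position).getD i 0))).dedup).length = i := by
  have hmono := List.pairwise_iff_getElem.mp (distinct_pairwise position)
  rw [List.getD_eq_getElem _ 0 hi]
  have hperm : ((position.filter (fun v => decide (v < (distinctOf position)[i]))).dedup).Perm
      ((distinctOf position).take i) := by
    rw [List.perm_ext_iff_of_nodup (List.nodup_dedup _)
      (List.Pairwise.sublist (List.take_sublist i _) (nodup_distinct position))]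
    intro a
    rw [List.mem_dedup, List.mem_filter, List.mem_take_iff_getElem]
    constructor
    · rintro ⟨ha, hlt⟩
      have hlt' : a < (distinctOf position)[i] := by simpa using hlt
      obtain ⟨j, hj, rfl⟩ := List.mem_iff_getElem.mp ((mem_distinct position a).mpr ha)
      exact ⟨j, by have := idx_lt_of_val_lt position hj hi hlt'; omega, rfl⟩
    · rintro ⟨j, hj, rfl⟩
      have hj1 : j < i := by omega
      have hj2 : j < (distinctOf position).length := by omega
      refine ⟨(mem_distinct position _).mp (List.getElem_mem hj2), ?_⟩
      simpa using hmono j i hj2 hi hj1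
  rw [hperm.length_eq, List.length_take]
  omega

lemma D_bridge (position height : List Int) (m : Int) :
    D_solution position height m ↔
      (m = 0 ∧ ∃ k < (distinctOf position).length - 1,
        (distinctOf position).getD (k+1) 0 ≤ (distinctOf position).getD k 0 + height.getD k 0) := by
  unfold D_solution
  have hmono := List.pairwise_iff_getElem.mp (distinct_pairwise position)
  constructor
  · rintro ⟨hm, p, hp, q, hq, hpq, hbet, hre⟩
    refine ⟨hm, ?_⟩
    obtain ⟨i, hi, hpi⟩ := List.mem_iff_getElem.mp ((mem_distinct position p).mpr hp)
    obtain ⟨j, hj, hqj⟩ := List.mem_iff_getElem.mp ((mem_distinct position q).mpr hq)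
    have hij : i < j := idx_lt_of_val_lt position hi hj (by rw [hpi, hqj]; exact hpq)
    have hadj : j = i + 1 := by
      by_contra hne
      have hij1 : i + 1 < j := by omega
      have hi1 : i + 1 < (distinctOf position).length := by omega
      refine hbet ((distinctOf position)[i+1]) ((mem_distinct position _).mp (List.getElem_mem hi1)) ?_
      constructor
      · rw [← hpi]; exact hmono i (i+1) hi hi1 (by omega)
      · rw [← hqj]; exact hmono (i+1) j hi1 hj hij1
    subst hadj
    refine ⟨i, by omega, ?_⟩
    have hrank : ((position.filter (fun v => decide (v < p))).dedup).length = i := by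
      rw [show p = (distinctOf position).getD i 0 from by rw [List.getD_eq_getElem _ 0 hi, hpi]]
      exact rank_eq position i hi
    rw [hrank] at hre
    rw [List.getD_eq_getElem _ 0 (show i + 1 < (distinctOf position).length by omega),
      List.getD_eq_getElem _ 0 hi, hqj, hpi]
    exact hre
  · rintro ⟨hm, k, hk, hle⟩
    refine ⟨hm, ?_⟩
    have hklen : k < (distinctOf position).length := by omega
    have hk1 : k + 1 < (distinctOf position).length := by omega
    refine ⟨(distinctOf position)[k], (mem_distinct position _).mp (List.getElem_mem hklen),
      (distinctOf position)[k+1], (mem_distinct position _).mp (List.getElem_mem hk1),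
      hmono k (k+1) hklen hk1 (by omega), ?_, ?_⟩
    · rintro r hr ⟨h1, h2⟩
      obtain ⟨j, hj, rfl⟩ := List.mem_iff_getElem.mp ((mem_distinct position r).mpr hr)
      have ha := idx_lt_of_val_lt position hklen hj h1
      have hb := idx_lt_of_val_lt position hj hk1 h2
      omega
    · have hrank : ((position.filter (fun v => decide (v < (distinctOf position)[k]))).dedup).length = k := by
        have := rank_eq position k hklen
        rwa [List.getD_eq_getElem _ 0 hklen] at this
      rw [hrank]
      rw [List.getD_eq_getElem _ 0 hk1, List.getD_eq_getElem _ 0 hklen] at hle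
      exact hle

-- both programs' value on every combination admitted by the claim
lemma percombo (position height : List Int) (m : Int) (hnD : ¬ D_solution position height m) :
    ∀ r ∈ PySem.List.combinations position m.toNat,
      getDestroyed m 0 (List.replicate (position.length+1) false) (tempOf position r) height
        = fB position height r := by
  intro r hr
  by_cases hm : m = 0
  · subst hm
    have hr' : r ∈ PySem.List.combinations position 0 := hr
    rw [PySem.List.combinations_zero] at hr'
    have hrnil : r = [] := by simpa using hr' 
    subst hrnil
    rw [getDestroyed_eq 0 (tempOf position []) height position.length
      (tempOf_pairwise position []) (tempOf_length_le position []), if_pos rfl]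
    have hW : W (distinctOf position) height = 0 := by
      apply W_eq_zero _ _ ((distinct_pairwise position).imp le_of_lt)
      intro k hk hle
      exact hnD ((D_bridge position height 0).mpr ⟨rfl, k, hk, hle⟩)
    unfold fB
    rw [tempOf_nil, tempB_nil,
      worstB_eq_W (distinctOf position) height (distinct_pairwise position), hW]
    ring
  · rw [getDestroyed_eq m (tempOf position r) height position.length
      (tempOf_pairwise position r) (tempOf_length_le position r), if_neg hm, one_mul]
    unfold fB
    rw [← temp_eq position r,
      worstB_eq_W (tempOf position r) height (tempOf_pairwise position r)]

lemma main_eq (position height : List Int) (m : Int)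
    (h0 : 0 ≤ m) (hle : m ≤ (position.length : Int))
    (hnD : ¬ D_solution position height m) :
    solution position height m = solution_alt position height m := by
  cases hc : PySem.List.combinations position m.toNat with
  | nil => exact absurd hc (combos_ne position m h0 hle)
  | cons c l => exact min_assemble position height m c l hc (percombo position height m hnD)

-- ---------- the stated difference is exact: A doubles, B does not ----------

lemma foldl_max_le_init : ∀ (l : List Nat) (f : Nat → Int) (a : Int),
    a ≤ l.foldl (fun w k => max w (f k)) a := by
  intro l
  induction l with
  | nil => intro f a; exact le_refl _
  | cons k t ih =>
    intro f a
    simp only [List.foldl_cons]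
    exact le_trans (le_max_left _ _) (ih f (max a (f k)))

lemma le_W_of_mem (temp height : List Int) (k : Nat) (hk : k < temp.length - 1) :
    cntK temp height k ≤ W temp height := by
  unfold W
  have : ∀ (l : List Nat) (a : Int), k ∈ l →
      cntK temp height k ≤ l.foldl (fun w k' => max w (cntK temp height k')) a := by
    intro l
    induction l with
    | nil => intro a h; simp at h
    | cons j t ih =>
      intro a h
      rcases List.mem_cons.mp h with h | h
      · subst h
        simp only [List.foldl_cons]
        exact le_trans (le_max_right _ _) (foldl_max_le_init t _ _)
      · exact ih _ h
  exact this _ 0 (List.mem_range.mpr hk)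

lemma W_ge_one (temp height : List Int) (k : Nat) (hk : k < temp.length - 1)
    (hle : temp.getD (k+1) 0 ≤ temp.getD k 0 + height.getD k 0) :
    1 ≤ W temp height := by
  have h1 : 1 ≤ cntK temp height k := by
    unfold cntK
    have hpos : 0 < (temp.drop (k+1)).countP (fun p => decide (p ≤ temp.getD k 0 + height.getD k 0)) := by
      rw [List.countP_pos_iff]
      refine ⟨temp.getD (k+1) 0, ?_, by simpa using hle⟩
      have hlen : 0 < (temp.drop (k+1)).length := by rw [List.length_drop]; omega
      have : (temp.drop (k+1))[0] = temp[k+1]'(by omega) := List.getElem_drop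
      rw [List.getD_eq_getElem temp 0 (by omega), ← this]
      exact List.getElem_mem hlen
    omega
  exact le_trans h1 (le_W_of_mem temp height k hk)

lemma tight (position height : List Int) (m : Int) (hD : D_solution position height m) :
    solution position height m ≠ solution_alt position height m := by
  obtain ⟨hm, k, hk, hle⟩ := (D_bridge position height m).mp hD
  subst hm
  have hc : PySem.List.combinations position (0:Int).toNat = [[]] :=
    PySem.List.combinations_zero position
  have hA : solution position height 0
      = getDestroyed 0 0 (List.replicate (position.length+1) false) (tempOf position []) height := by
    rw [A_as_min, hc, List.map_cons, List.map_nil, PySem.List.min?_id_cons, List.foldl_nil]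
  have hB : solution_alt position height 0 = fB position height [] := by
    rw [alt_eq, hc,
      skipfold_run keyOf (fB position height)
        (fun a b h => by unfold fB tempB; rw [h]) [] [], List.foldl_nil]
  have hW : 1 ≤ W (distinctOf position) height := W_ge_one (distinctOf position) height k hk hle
  rw [hA, hB,
    getDestroyed_eq 0 (tempOf position []) height position.length
      (tempOf_pairwise position []) (tempOf_length_le position []), if_pos rfl]
  unfold fB
  rw [tempOf_nil, tempB_nil,
    worstB_eq_W (distinctOf position) height (distinct_pairwise position)]
  omega

-- ===== VERDICT (by name: the statement is the Claim_ definition above) =====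
theorem solution_spec : Claim_unchanged_solution := by
  intro position height m hDom hPre
  unfold Spec_solution
  intro hnD
  obtain ⟨h0, hle, -, -⟩ := hPre
  exact main_eq position height m h0 hle hnD

theorem solution_changed : Claim_changed_solution := by
  unfold Claim_changed_solution
  decide

theorem solution_tight : Claim_exact_solution := by
  intro position height m _ _ hD
  exact tight position height m hD
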